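-- pv_equiv track=rewrite | github.com/yudai-patronai/problembook | problems/arrays/consonant_palindrome/solution.py | solve
-- ===== SOURCE A (Python) =====
-- def solve(word):
--     vowel = 'aeiouy'
--     pal = ''
--     for c in word:
--         if c not in vowel:
--             pal += c
--
--     if pal == pal[::-1]:
--         return 'YES'
--     else:
--         return 'NO'
-- ===== SOURCE B (Python) =====
-- def solve(word):
--     vowel = 'aeiouy'
--     i, j = 0, len(word) - 1
--     while i < j:
--         if word[i] in vowel:
--             i += 1
--         elif word[j] in vowel:
--             j -= 1
--         elif word[i] != word[j]:
--             return 'NO'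
--         else:
--             i += 1
--             j -= 1
--     return 'YES'
-- ===== Notes on version B (the rewrite author's own statement) =====
-- stated objective: faster
-- what changed: Replaced A's build-a-filtered-string-and-compare-with-its-reverse by an in-place two-pointer scan over the original word that skips vowels from both ends and compares consonants directly, with no intermediate string and early exit on the first mismatch.
import Mathlib
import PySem

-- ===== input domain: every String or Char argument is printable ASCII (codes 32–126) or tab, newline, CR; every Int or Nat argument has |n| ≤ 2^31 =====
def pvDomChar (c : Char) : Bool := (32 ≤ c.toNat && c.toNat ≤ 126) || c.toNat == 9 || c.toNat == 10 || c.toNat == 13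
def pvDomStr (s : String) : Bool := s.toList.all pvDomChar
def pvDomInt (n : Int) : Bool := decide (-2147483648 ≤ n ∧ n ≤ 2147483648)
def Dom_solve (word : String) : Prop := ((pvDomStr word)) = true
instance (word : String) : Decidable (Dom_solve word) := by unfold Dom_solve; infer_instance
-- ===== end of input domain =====

-- B replaces A's filtered-copy-vs-its-reverse comparison by a two-pointer scan over the original
-- word (skip vowels at each end, compare consonants in place); same result, no intermediate string.

-- ===== PORT A =====
def solve (word : String) : String :=
  let pal := word.toList.foldl
    (fun acc c => if !(("aeiouy".toList).contains c) then acc ++ [c] else acc) []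
  if pal == pal.reverse then "YES" else "NO"

-- ===== PORT B =====
-- the while-loop of Source B: i moves right past vowels, j moves left past vowels,
-- consonants are compared in place; word[i]/word[j] are always in range when read (0 ≤ i < j < len)
def solveGo (l : List Char) (i j : Int) : Bool :=
  if i < j then
    let a := l.getD i.toNat ' '
    let b := l.getD j.toNat ' '
    if ("aeiouy".toList).contains a then solveGo l (i+1) j
    else if ("aeiouy".toList).contains b then solveGo l i (j-1)
    else if a != b then false
    else solveGo l (i+1) (j-1)
  else true
termination_by (j - i).toNat
decreasing_by all_goals omega

def solve_alt (word : String) : String :=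
  if solveGo word.toList 0 ((word.toList.length : Int) - 1) then "YES" else "NO"

-- ===== PRECONDITION & SPEC =====
def Spec_solve (word : String) (out : String) : Prop := out = solve_alt word
instance (word : String) (out : String) : Decidable (Spec_solve word out) := by unfold Spec_solve; infer_instance

-- ===== CLAIM (what is proved, stated in full; the proofs are below) =====
def Claim_equal_solve : Prop := ∀ (word : String), Dom_solve word → Spec_solve word (solve word)

-- ===== LEMMAS AND PROOFS =====
def pal2 : List Char → Bool
  | [] => true
  | a :: rest =>
    if h : rest = [] then true
    else
      let b := rest.getLast h
      if ("aeiouy".toList).contains a then pal2 rest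
      else if ("aeiouy".toList).contains b then pal2 (a :: rest.dropLast)
      else if a != b then false
      else pal2 rest.dropLast
termination_by l => l.length
decreasing_by
  all_goals (have hp : 0 < rest.length := List.length_pos_of_ne_nil (by assumption)
             simp [List.length_dropLast]
             try omega)

def fcons (l : List Char) : List Char := l.filter (fun c => !(("aeiouy".toList).contains c))

theorem fcons_cons (a : Char) (l : List Char) :
    fcons (a :: l) = if ("aeiouy".toList).contains a then fcons l else a :: fcons l := by
  by_cases h : ("aeiouy".toList).contains a = true <;>
    simp only [fcons, List.filter_cons, h, Bool.not_true, Bool.not_false, if_true, if_false,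
      Bool.false_eq_true] <;> simp

theorem fcons_append (s t : List Char) : fcons (s ++ t) = fcons s ++ fcons t := by
  simp [fcons]

theorem fcons_single_v (b : Char) (hv : ("aeiouy".toList).contains b = true) :
    fcons [b] = [] := by
  simp only [fcons, List.filter_cons, hv, Bool.not_true, List.filter_nil]
  simp

theorem fcons_single_c (b : Char) (hv : ("aeiouy".toList).contains b = false) :
    fcons [b] = [b] := by
  simp only [fcons, List.filter_cons, hv, Bool.not_false, List.filter_nil]
  simp

-- unfolding lemmas for pal2
theorem pal2_nil : pal2 [] = true := by simp [pal2]

theorem pal2_single (a : Char) : pal2 [a] = true := by simp [pal2]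

theorem pal2_cons_v (a : Char) (rest : List Char) (h : rest ≠ [])
    (hv : ("aeiouy".toList).contains a = true) : pal2 (a :: rest) = pal2 rest := by
  rw [pal2]; simp at hv; simp [h, hv]

theorem pal2_last_v (a : Char) (rest : List Char) (h : rest ≠ [])
    (hva : ¬ ("aeiouy".toList).contains a = true)
    (hvb : ("aeiouy".toList).contains (rest.getLast h) = true) :
    pal2 (a :: rest) = pal2 (a :: rest.dropLast) := by
  rw [pal2]; simp at hva hvb; simp [h, hva, hvb]

theorem pal2_ne (a : Char) (rest : List Char) (h : rest ≠ [])
    (hva : ¬ ("aeiouy".toList).contains a = true)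
    (hvb : ¬ ("aeiouy".toList).contains (rest.getLast h) = true)
    (hne : a ≠ rest.getLast h) : pal2 (a :: rest) = false := by
  rw [pal2]; simp at hva hvb; simp [h, hva, hvb, hne]

theorem pal2_eq (a : Char) (rest : List Char) (h : rest ≠ [])
    (hva : ¬ ("aeiouy".toList).contains a = true)
    (hvb : ¬ ("aeiouy".toList).contains (rest.getLast h) = true)
    (heq : a = rest.getLast h) : pal2 (a :: rest) = pal2 rest.dropLast := by
  rw [pal2]; simp at hva hvb; simp [h, hva, hvb, heq]

theorem pal2_short (s : List Char) (h : s.length ≤ 1) : pal2 s = true := by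
  match s with
  | [] => exact pal2_nil
  | [a] => exact pal2_single a
  | a :: b :: t => simp at h

theorem pal2_eq_spec (s : List Char) : pal2 s = (fcons s == (fcons s).reverse) := by
  induction s using pal2.induct with
  | case1 => simp [pal2_nil, fcons]
  | case2 a =>
      rw [pal2_single, fcons_cons]
      split_ifs <;> simp [fcons]
  | case3 a rest h hv ih =>
      rw [pal2_cons_v a rest h hv, ih, fcons_cons, if_pos hv]
  | case4 a rest h b hva hvb ih =>
      have hvb' : ("aeiouy".toList).contains (rest.getLast h) = true := hvb
      rw [pal2_last_v a rest h hva hvb', ih]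
      have hfc : fcons (a :: rest) = fcons (a :: rest.dropLast) := by
        conv_lhs => rw [show (a :: rest) = (a :: rest.dropLast) ++ [rest.getLast h] by
          rw [List.cons_append, List.dropLast_append_getLast h]]
        rw [fcons_append, fcons_single_v _ hvb', List.append_nil]
      rw [hfc]
  | case5 a rest h b hva hvb hne =>
      have hvb' : ¬ ("aeiouy".toList).contains (rest.getLast h) = true := hvb
      rw [pal2_ne a rest h hva hvb' (by simpa [bne_iff_ne] using hne)]
      have hfa : ("aeiouy".toList).contains a = false := eq_false_of_ne_true hva
      have hfb : ("aeiouy".toList).contains (rest.getLast h) = false := eq_false_of_ne_true hvb'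
      have hfc : fcons (a :: rest) = a :: (fcons rest.dropLast ++ [rest.getLast h]) := by
        conv_lhs => rw [show (a :: rest) = (a :: rest.dropLast) ++ [rest.getLast h] by
          rw [List.cons_append, List.dropLast_append_getLast h]]
        rw [fcons_append, fcons_cons, hfa, if_neg (by simp), fcons_single_c _ hfb]
        simp
      rw [hfc]
      symm
      rw [beq_eq_false_iff_ne]
      intro hEq
      have hhd := congrArg (fun t => t.headD ' ') hEq
      simp [List.reverse_cons, List.reverse_append] at hhd
      simp only [bne_iff_ne, ne_eq] at hne
      exact hne hhd
  | case6 a rest h b hva hvb heq ih =>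
      simp only [bne_iff_ne, ne_eq, not_not] at heq
      have heq' : a = rest.getLast h := heq
      have hvb' : ¬ ("aeiouy".toList).contains (rest.getLast h) = true := hvb
      rw [pal2_eq a rest h hva hvb' heq', ih]
      have hfa : ("aeiouy".toList).contains a = false := eq_false_of_ne_true hva
      have hfb : ("aeiouy".toList).contains (rest.getLast h) = false := eq_false_of_ne_true hvb'
      have hfc : fcons (a :: rest) = a :: (fcons rest.dropLast ++ [a]) := by
        conv_lhs => rw [show (a :: rest) = (a :: rest.dropLast) ++ [rest.getLast h] by
          rw [List.cons_append, List.dropLast_append_getLast h]]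
        rw [fcons_append, fcons_cons, hfa, if_neg (by simp), fcons_single_c _ hfb, ← heq']
        simp
      rw [hfc]
      rw [Bool.eq_iff_iff]
      simp only [beq_iff_eq, List.reverse_cons, List.reverse_append, List.reverse_nil,
        List.nil_append, List.cons_append]
      constructor
      · intro hEq
        rw [hEq]
        simp
        exact hEq.symm
      · intro hEq
        have h2 : fcons rest.dropLast ++ [a] = (fcons rest.dropLast).reverse ++ [a] := by
          exact (List.cons_injective hEq : _)
        have := congrArg List.dropLast h2
        simpa using this

def seg (l : List Char) (i j : Int) : List Char := (l.drop i.toNat).take (j + 1 - i).toNat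

theorem seg_length (l : List Char) (i j : Int) :
    (seg l i j).length = min (j + 1 - i).toNat (l.length - i.toNat) := by
  simp [seg, Nat.min_comm]

theorem seg_cons (l : List Char) (i j : Int) (hi : 0 ≤ i) (hij : i ≤ j)
    (hj : j < (l.length : Int)) :
    seg l i j = l[i.toNat]'(by omega) :: seg l (i + 1) j := by
  have h1 : i.toNat < l.length := by omega
  have h2 : (j + 1 - i).toNat = (j + 1 - (i + 1)).toNat + 1 := by omega
  have h3 : (i + 1).toNat = i.toNat + 1 := by omega
  rw [seg, List.drop_eq_getElem_cons h1, h2, List.take_succ_cons, seg, h3]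

theorem seg_ne_nil (l : List Char) (i j : Int) (hi : 0 ≤ i) (hij : i ≤ j)
    (hj : j < (l.length : Int)) : seg l i j ≠ [] := by
  have := seg_length l i j
  intro hc
  rw [hc] at this
  simp at this
  omega

theorem seg_getLast (l : List Char) (i j : Int) (hi : 0 ≤ i) (hij : i ≤ j)
    (hj : j < (l.length : Int)) (h : seg l i j ≠ []) :
    (seg l i j).getLast h = l[j.toNat]'(by omega) := by
  have hlen : (seg l i j).length = (j + 1 - i).toNat := by
    rw [seg_length]; omega
  rw [List.getLast_eq_getElem]
  have hk : (seg l i j).length - 1 < (seg l i j).length := by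
    rw [hlen]; omega
  simp only [seg] at hk ⊢
  rw [List.getElem_take, List.getElem_drop]
  congr 1
  simp only [seg] at hlen
  omega

theorem seg_dropLast (l : List Char) (i j : Int) (hi : 0 ≤ i) (hij : i ≤ j)
    (hj : j < (l.length : Int)) : (seg l i j).dropLast = seg l i (j - 1) := by
  have hlen : (seg l i j).length = (j + 1 - i).toNat := by
    rw [seg_length]; omega
  rw [List.dropLast_eq_take, hlen, seg, List.take_take, seg]
  congr 1
  omega

theorem seg_short (l : List Char) (i j : Int) (hij : ¬ i < j) : (seg l i j).length ≤ 1 := by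
  have := seg_length l i j
  omega

theorem solveGo_eq_pal2 (l : List Char) (i j : Int) (hi : 0 ≤ i) (hj : j < (l.length : Int)) :
    solveGo l i j = pal2 (seg l i j) := by
  induction i, j using solveGo.induct l with
  | case1 i j hlt a hva ih =>
      have hgi : l.getD i.toNat ' ' = l[i.toNat]'(by omega) := List.getD_eq_getElem l ' ' (by omega)
      have hva' : ("aeiouy".toList).contains (l[i.toNat]'(by omega)) = true := by
        rw [← hgi]; exact hva
      rw [solveGo, if_pos hlt, if_pos (hgi ▸ hva' : _)]
      rw [seg_cons l i j hi (le_of_lt hlt) hj]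
      rw [pal2_cons_v _ _ (seg_ne_nil l (i+1) j (by omega) (by omega) hj) hva']
      exact ih (by omega) hj
  | case2 i j hlt a b hva hvb ih =>
      have hgi : l.getD i.toNat ' ' = l[i.toNat]'(by omega) := List.getD_eq_getElem l ' ' (by omega)
      have hgj : l.getD j.toNat ' ' = l[j.toNat]'(by omega) := List.getD_eq_getElem l ' ' (by omega)
      have hva' : ¬ ("aeiouy".toList).contains (l[i.toNat]'(by omega)) = true := by
        rw [← hgi]; exact hva
      have hvb' : ("aeiouy".toList).contains (l[j.toNat]'(by omega)) = true := by
        rw [← hgj]; exact hvb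
      rw [solveGo, if_pos hlt, if_neg (hgi ▸ hva' : _), if_pos (hgj ▸ hvb' : _)]
      have hne : seg l (i+1) j ≠ [] := seg_ne_nil l (i+1) j (by omega) (by omega) hj
      rw [seg_cons l i j hi (le_of_lt hlt) hj]
      rw [pal2_last_v _ _ hne hva' (by rw [seg_getLast l (i+1) j (by omega) (by omega) hj hne]; exact hvb')]
      rw [seg_dropLast l (i+1) j (by omega) (by omega) hj]
      rw [← seg_cons l i (j-1) hi (by omega) (by omega)]
      exact ih hi (by omega)
  | case3 i j hlt a b hva hvb hne =>
      have hgi : l.getD i.toNat ' ' = l[i.toNat]'(by omega) := List.getD_eq_getElem l ' ' (by omega)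
      have hgj : l.getD j.toNat ' ' = l[j.toNat]'(by omega) := List.getD_eq_getElem l ' ' (by omega)
      have hva' : ¬ ("aeiouy".toList).contains (l[i.toNat]'(by omega)) = true := by
        rw [← hgi]; exact hva
      have hvb' : ¬ ("aeiouy".toList).contains (l[j.toNat]'(by omega)) = true := by
        rw [← hgj]; exact hvb
      have hne' : (l[i.toNat]'(by omega)) ≠ (l[j.toNat]'(by omega)) := by
        have : (a != b) = true := hne
        rw [bne_iff_ne] at this
        rw [← hgi, ← hgj]; exact this
      rw [solveGo, if_pos hlt, if_neg (hgi ▸ hva' : _), if_neg (hgj ▸ hvb' : _),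
        if_pos (by rw [bne_iff_ne, ← hgi, ← hgj] at *; exact hne')]
      have hnn : seg l (i+1) j ≠ [] := seg_ne_nil l (i+1) j (by omega) (by omega) hj
      rw [seg_cons l i j hi (le_of_lt hlt) hj]
      rw [pal2_ne _ _ hnn hva' (by rw [seg_getLast l (i+1) j (by omega) (by omega) hj hnn]; exact hvb')
        (by rw [seg_getLast l (i+1) j (by omega) (by omega) hj hnn]; exact hne')]
  | case4 i j hlt a b hva hvb heq ih =>
      have hgi : l.getD i.toNat ' ' = l[i.toNat]'(by omega) := List.getD_eq_getElem l ' ' (by omega)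
      have hgj : l.getD j.toNat ' ' = l[j.toNat]'(by omega) := List.getD_eq_getElem l ' ' (by omega)
      have hva' : ¬ ("aeiouy".toList).contains (l[i.toNat]'(by omega)) = true := by
        rw [← hgi]; exact hva
      have hvb' : ¬ ("aeiouy".toList).contains (l[j.toNat]'(by omega)) = true := by
        rw [← hgj]; exact hvb
      have heq' : (l[i.toNat]'(by omega)) = (l[j.toNat]'(by omega)) := by
        have : ¬ (a != b) = true := heq
        rw [bne_iff_ne, not_not] at this
        rw [← hgi, ← hgj]; exact this
      rw [solveGo, if_pos hlt, if_neg (hgi ▸ hva' : _), if_neg (hgj ▸ hvb' : _),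
        if_neg (by rw [bne_iff_ne, not_not, ← hgi, ← hgj] at *; exact heq')]
      have hnn : seg l (i+1) j ≠ [] := seg_ne_nil l (i+1) j (by omega) (by omega) hj
      rw [seg_cons l i j hi (le_of_lt hlt) hj]
      rw [pal2_eq _ _ hnn hva' (by rw [seg_getLast l (i+1) j (by omega) (by omega) hj hnn]; exact hvb')
        (by rw [seg_getLast l (i+1) j (by omega) (by omega) hj hnn]; exact heq')]
      rw [seg_dropLast l (i+1) j (by omega) (by omega) hj]
      exact ih (by omega) (by omega)
  | case5 i j hlt =>
      rw [solveGo, if_neg hlt, pal2_short _ (seg_short l i j hlt)]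

theorem final_assembly (word : String) : solve word = solve_alt word := by
  unfold solve solve_alt
  rw [PySem.List.foldl_append_if_eq_filter]
  rw [solveGo_eq_pal2 word.toList 0 ((word.toList.length : Int) - 1) (by omega) (by omega)]
  have hseg : seg word.toList 0 ((word.toList.length : Int) - 1) = word.toList := by
    simp [seg]
  rw [hseg, pal2_eq_spec]
  rfl

-- ===== VERDICT (by name: the statement is the Claim_ definition above) =====
theorem solve_spec : Claim_equal_solve := by
  intro word _
  unfold Spec_solve
  exact final_assembly word
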